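-- pv_equiv track=rewrite | github.com/nevragurses/-Python-Projects | CSE321-HW3/hw3.py | helperFakeCoin
-- ===== SOURCE A (Python) =====
-- def helperFakeCoin(coinArr,size):
--     if size==1:
--         return coinArr #returning finded fake coin.
--     elif size==2: #if size is 2,coin that amount less one is fake coin.
--         middle=(int)(size/2)
--         if sum(coinArr[0:middle]) < sum (coinArr[middle: size]):
--             return helperFakeCoin (coinArr[0:middle],len(coinArr[middle : size ]))
--         else:
--             return helperFakeCoin (coinArr[middle:size],len(coinArr[middle : size ]))
--
--     else: #if size is 3 or more,divide coin array 3 part and make recursive call on part that is sum of coin amount less one.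
--         divided=(int)(size/3)
--         if sum(coinArr[0:divided])==sum (coinArr[divided: 2*divided]):
--             return helperFakeCoin (coinArr[2*divided : size],len(coinArr[2*divided : size]))
--         elif sum(coinArr[0:divided])<sum (coinArr[divided: 2*divided]):
--             return helperFakeCoin (coinArr[0:divided],len(coinArr[0:divided]))
--         elif sum(coinArr[0:divided])>sum (coinArr[divided: 2*divided]):
--             return helperFakeCoin (coinArr[divided: 2*divided],len(coinArr[divided: 2*divided]))
-- ===== SOURCE B (Python) =====
-- def helperFakeCoin(coinArr, size):
--     arr, sz = coinArr, size
--     while sz != 1: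
--         if sz == 2:
--             x, y = arr[0], arr[1]
--             arr = [x] if x < y else [y]
--         else:
--             d = sz // 3
--             first, second, rest = arr[:d], arr[d:2 * d], arr[2 * d:sz]
--             s1, s2 = sum(first), sum(second)
--             arr = rest if s1 == s2 else (first if s1 < s2 else second)
--         sz = len(arr)
--     return arr
-- ===== Notes on version B (the rewrite author's own statement) =====
-- stated objective: simpler
-- what changed: A's tail recursion (which re-slices and makes an extra recursive call even in the 2-coin case) is replaced by an iterative loop over a (subarray, size) state, with the 2-coin case resolved by one direct element comparison.
-- outside the precondition, e.g. on helperFakeCoin([0, 1], 3): A returns [0], B returns [0]; on helperFakeCoin([5, 6], -1): A returns [5], B does not finish within the time limit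
import Mathlib
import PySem

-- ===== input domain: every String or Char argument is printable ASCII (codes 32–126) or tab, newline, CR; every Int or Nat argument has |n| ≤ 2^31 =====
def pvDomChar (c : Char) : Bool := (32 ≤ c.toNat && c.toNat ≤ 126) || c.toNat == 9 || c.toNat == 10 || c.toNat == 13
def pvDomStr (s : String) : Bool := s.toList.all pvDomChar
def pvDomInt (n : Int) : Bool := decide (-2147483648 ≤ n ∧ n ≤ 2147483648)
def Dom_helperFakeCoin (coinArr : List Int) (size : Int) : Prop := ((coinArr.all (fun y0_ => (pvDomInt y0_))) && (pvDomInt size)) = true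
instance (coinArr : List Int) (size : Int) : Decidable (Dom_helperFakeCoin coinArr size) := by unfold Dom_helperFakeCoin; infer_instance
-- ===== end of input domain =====

-- B replaces A's tail recursion by an iterative (subarray, size) loop and resolves the
-- 2-coin case by one direct element comparison; correctness claimed on Pre_ (see below).

-- ===== PORT A =====
-- A's recursion, fuel-guarded (fuel only makes it total; on Pre_ it never runs out).
def fakeCoinAuxA : Nat → List Int → Int → List Int
  | 0, coinArr, _ => coinArr
  | fuel + 1, coinArr, size =>
    if size = 1 then
      coinArr
    else if size = 2 then
      let middle : Int := PySem.Int.truncdiv size 2   -- (int)(size/2)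
      if (PySem.List.slice coinArr (some 0) (some middle)).sum <
          (PySem.List.slice coinArr (some middle) (some size)).sum then
        fakeCoinAuxA fuel (PySem.List.slice coinArr (some 0) (some middle))
          (PySem.List.len (PySem.List.slice coinArr (some middle) (some size)))
      else
        fakeCoinAuxA fuel (PySem.List.slice coinArr (some middle) (some size))
          (PySem.List.len (PySem.List.slice coinArr (some middle) (some size)))
    else
      let divided : Int := PySem.Int.truncdiv size 3   -- (int)(size/3)
      if (PySem.List.slice coinArr (some 0) (some divided)).sum =
          (PySem.List.slice coinArr (some divided) (some (2 * divided))).sum then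
        fakeCoinAuxA fuel (PySem.List.slice coinArr (some (2 * divided)) (some size))
          (PySem.List.len (PySem.List.slice coinArr (some (2 * divided)) (some size)))
      else if (PySem.List.slice coinArr (some 0) (some divided)).sum <
          (PySem.List.slice coinArr (some divided) (some (2 * divided))).sum then
        fakeCoinAuxA fuel (PySem.List.slice coinArr (some 0) (some divided))
          (PySem.List.len (PySem.List.slice coinArr (some 0) (some divided)))
      else  -- the remaining 'elif sum > sum' branch (trichotomy: always taken here)
        fakeCoinAuxA fuel (PySem.List.slice coinArr (some divided) (some (2 * divided)))
          (PySem.List.len (PySem.List.slice coinArr (some divided) (some (2 * divided))))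

def helperFakeCoin (coinArr : List Int) (size : Int) : List Int :=
  fakeCoinAuxA (size.toNat + 1) coinArr size

-- ===== PORT B =====
-- Source B's while loop, fuel-guarded (fuel only makes it total; on Pre_ it never runs out).
def fakeCoinLoopB : Nat → List Int → Int → List Int
  | 0, arr, _ => arr
  | fuel + 1, arr, sz =>
    if sz = 1 then
      arr
    else
      let arr' : List Int :=
        if sz = 2 then
          let x := PySem.List.pyGetD arr 0 0   -- arr[0]; in range on Pre_
          let y := PySem.List.pyGetD arr 1 0   -- arr[1]; in range on Pre_
          if x < y then [x] else [y]
        else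
          let d := PySem.Int.floordiv sz 3
          let first := PySem.List.slice arr (some 0) (some d)
          let second := PySem.List.slice arr (some d) (some (2 * d))
          let rest := PySem.List.slice arr (some (2 * d)) (some sz)
          let s1 := first.sum
          let s2 := second.sum
          if s1 = s2 then rest else if s1 < s2 then first else second
      fakeCoinLoopB fuel arr' (PySem.List.len arr')

def helperFakeCoin_alt (coinArr : List Int) (size : Int) : List Int :=
  fakeCoinLoopB (size.toNat + 1) coinArr size

-- ===== PRECONDITION & SPEC =====
-- Pre_ excludes size ≤ 0, size = 2 with fewer than 2 coins, and size ≥ 3 with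
-- len(coinArr) ≤ 2*(size//3): there A's mismatched size parameter can drive the recursion
-- to size 0 and a RecursionError, and where slice clamping happens to let A return anyway,
-- that value is an accident of the mismatch, not the function's purpose.
def Pre_helperFakeCoin (coinArr : List Int) (size : Int) : Prop :=
  size = 1 ∨ (size = 2 ∧ 2 ≤ (coinArr.length : Int))
    ∨ (3 ≤ size ∧ 2 * (size / 3) < (coinArr.length : Int))
instance (coinArr : List Int) (size : Int) : Decidable (Pre_helperFakeCoin coinArr size) := by
  unfold Pre_helperFakeCoin; infer_instance

def pvWitness_helperFakeCoin : List Int × Int := ([3, 1, 3], 3)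

def Spec_helperFakeCoin (coinArr : List Int) (size : Int) (out : List Int) : Prop :=
  out = helperFakeCoin_alt coinArr size
instance (coinArr : List Int) (size : Int) (out : List Int) : Decidable (Spec_helperFakeCoin coinArr size out) := by
  unfold Spec_helperFakeCoin; infer_instance

-- ===== CLAIM (what is proved, stated in full; the proofs are below) =====
def Claim_equal_helperFakeCoin : Prop := ∀ (coinArr : List Int) (size : Int), Dom_helperFakeCoin coinArr size → Pre_helperFakeCoin coinArr size → Spec_helperFakeCoin coinArr size (helperFakeCoin coinArr size)

-- ===== LEMMAS AND PROOFS =====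

-- Both steppers, run with enough fuel from any state satisfying the invariant
-- 1 ≤ size ≤ len(arr), produce the same list.
lemma fakeCoin_main (n : Nat) : ∀ (arr : List Int) (size : Int) (fa fb : Nat),
    Pre_helperFakeCoin arr size → size.toNat ≤ n → size.toNat ≤ fa → size.toNat ≤ fb →
    fakeCoinAuxA fa arr size = fakeCoinLoopB fb arr size := by
  induction n using Nat.strong_induction_on with
  | _ n ih =>
    intro arr size fa fb hP hn hfa hfb
    unfold Pre_helperFakeCoin at hP
    have h1 : 1 ≤ size := by rcases hP with h | ⟨h, _⟩ | ⟨h, _⟩ <;> omega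
    obtain ⟨fa', rfl⟩ : ∃ k, fa = k + 1 := ⟨fa - 1, by omega⟩
    obtain ⟨fb', rfl⟩ : ∃ k, fb = k + 1 := ⟨fb - 1, by omega⟩
    by_cases hs1 : size = 1
    · subst hs1; simp [fakeCoinAuxA, fakeCoinLoopB]
    by_cases hs2 : size = 2
    · have h2 : (2 : Int) ≤ (arr.length : Int) := by
        rcases hP with h | ⟨_, h⟩ | ⟨h, _⟩ <;> omega
      subst hs2
      obtain ⟨a, b, t, rfl⟩ : ∃ a b t, arr = a :: b :: t := by
        match arr with
        | [] => exact absurd h2 (by norm_num)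
        | [a] => exact absurd h2 (by norm_num)
        | a :: b :: t => exact ⟨a, b, t, rfl⟩
      obtain ⟨k, rfl⟩ : ∃ k, fa' = k + 1 := ⟨fa' - 1, by omega⟩
      obtain ⟨m, rfl⟩ : ∃ k, fb' = k + 1 := ⟨fb' - 1, by omega⟩
      have e1 : PySem.List.slice (a :: b :: t) (some 0) (some (PySem.Int.truncdiv 2 2)) = [a] := by
        rw [show PySem.Int.truncdiv (2 : Int) 2 = 1 by decide,
          PySem.List.slice_toNat _ (by norm_num) (by norm_num)]
        rfl
      have e2 : PySem.List.slice (a :: b :: t) (some (PySem.Int.truncdiv 2 2)) (some 2) = [b] := by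
        rw [show PySem.Int.truncdiv (2 : Int) 2 = 1 by decide,
          PySem.List.slice_toNat _ (by norm_num) (by norm_num)]
        rfl
      have hy : PySem.List.pyGetD (a :: b :: t) 1 0 = b := by simp [pysem]
      norm_num [fakeCoinAuxA, fakeCoinLoopB, e1, e2, PySem.List.len_eq,
        PySem.List.pyGetD_zero_cons, hy]
      split_ifs <;> norm_num [fakeCoinAuxA, fakeCoinLoopB]
    · -- size ≥ 3
      have hs3 : 3 ≤ size := by rcases hP with h | ⟨h, _⟩ | ⟨h, _⟩ <;> omega
      have hL : 2 * (size / 3) < (arr.length : Int) := by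
        rcases hP with h | ⟨h, _⟩ | ⟨_, h⟩ <;> omega
      have h0 : (0 : Int) ≤ size := by omega
      have hde : PySem.Int.floordiv size 3 = size / 3 := by
        simp only [PySem.Int.floordiv]; rw [Int.fdiv_eq_ediv_of_nonneg _ (by norm_num)]
      have hdd : PySem.Int.truncdiv size 3 = PySem.Int.floordiv size 3 := by
        simp only [PySem.Int.truncdiv, PySem.Int.floordiv]
        rw [Int.tdiv_eq_ediv_of_nonneg h0, Int.fdiv_eq_ediv_of_nonneg _ (by norm_num)]
      have hd1 : 1 ≤ PySem.Int.floordiv size 3 := by rw [hde]; omega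
      have hd2 : 2 * PySem.Int.floordiv size 3 + 1 ≤ size := by rw [hde]; omega
      have hfst : PySem.List.slice arr (some 0) (some (PySem.Int.floordiv size 3))
          = arr.take ((PySem.Int.floordiv size 3).toNat - (0 : Int).toNat) := by
        rw [PySem.List.slice_toNat _ le_rfl (by omega)]; rfl
      have hsec : PySem.List.slice arr (some (PySem.Int.floordiv size 3))
            (some (2 * PySem.Int.floordiv size 3))
          = (arr.drop (PySem.Int.floordiv size 3).toNat).take
              ((2 * PySem.Int.floordiv size 3).toNat - (PySem.Int.floordiv size 3).toNat) :=
        PySem.List.slice_toNat _ (by omega) (by omega)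
      have hrest : PySem.List.slice arr (some (2 * PySem.Int.floordiv size 3)) (some size)
          = (arr.drop (2 * PySem.Int.floordiv size 3).toNat).take
              (size.toNat - (2 * PySem.Int.floordiv size 3).toNat) :=
        PySem.List.slice_toNat _ (by omega) (by omega)
      have hdt : (PySem.Int.floordiv size 3).toNat = (size / 3).toNat := by rw [hde]
      have hdt2 : (2 * PySem.Int.floordiv size 3).toNat = (2 * (size / 3)).toNat := by rw [hde]
      have hlen : ∀ (X : List Int), 1 ≤ X.length → X.length < size.toNat →
          fakeCoinAuxA fa' X ((X.length : Int)) = fakeCoinLoopB fb' X ((X.length : Int)) := by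
        intro X hX1 hX2
        refine ih X.length (by omega) X _ fa' fb' ?_ (by omega) (by omega) (by omega)
        unfold Pre_helperFakeCoin; omega
      simp only [fakeCoinAuxA, fakeCoinLoopB, if_neg hs1, if_neg hs2, hdd,
        hfst, hsec, hrest, PySem.List.len_eq]
      split_ifs <;> apply hlen <;>
        · simp only [List.length_take, List.length_drop, hdt, hdt2]
          omega

-- ===== VERDICT (by name: the statement is the Claim_ definition above) =====
theorem helperFakeCoin_spec : Claim_equal_helperFakeCoin := by
  intro coinArr size _ hpre
  unfold Spec_helperFakeCoin helperFakeCoin helperFakeCoin_alt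
  exact fakeCoin_main (size.toNat + 1) coinArr size _ _ hpre (by omega) (by omega) (by omega)
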